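-- pv_equiv track=rewrite | github.com/SrijanSriv211/Cpix | src/color/color.py | word_matching
-- ===== SOURCE A (Python) =====
-- def word_matching(sentence, sentences):
--     matching_sentences = sorted(
--         [
--             (idx, sent, len(set(sentence.split()) & set(sent.split())))
--             for idx, sent in sentences
--             if len(set(sentence.split()) & set(sent.split())) > 0
--         ],
--         key=lambda x: x[2],
--         reverse=True
--     )[:20]
--
--     similar_sentences = []
--     for i in matching_sentences:
--         similar_sentences.append({
--             "index": i[0],
--             "score": i[2],
--         })
--
--     return sorted(similar_sentences, key=lambda x: x["score"], reverse=True)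
-- ===== SOURCE B (Python) =====
-- def _insert_desc(top, item):
--     # insert item before the first entry with a strictly smaller score
--     # (i.e. after all entries with score >= item's: same order as a stable
--     # descending sort by score)
--     for pos, (_, s) in enumerate(top):
--         if s < item[1]:
--             return top[:pos] + [item] + top[pos:]
--     return top + [item]
--
--
-- def word_matching(sentence, sentences):
--     query = set(sentence.split())
--     top = []  # at most 20 (index, score) pairs, descending by score, stable
--     for idx, sent in sentences:
--         score = len(query & set(sent.split()))
--         if score > 0:
--             top = _insert_desc(top, (idx, score))[:20]
--     return [{"index": i, "score": s} for i, s in top]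
-- ===== Notes on version B (the rewrite author's own statement) =====
-- stated objective: faster
-- what changed: B builds the query word set once and maintains a bounded (<=20) stable descending top list by partial insertion in a single pass, instead of A's rebuilding the query set twice per sentence, sorting the whole candidate list, slicing, and sorting again.
import Mathlib
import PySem

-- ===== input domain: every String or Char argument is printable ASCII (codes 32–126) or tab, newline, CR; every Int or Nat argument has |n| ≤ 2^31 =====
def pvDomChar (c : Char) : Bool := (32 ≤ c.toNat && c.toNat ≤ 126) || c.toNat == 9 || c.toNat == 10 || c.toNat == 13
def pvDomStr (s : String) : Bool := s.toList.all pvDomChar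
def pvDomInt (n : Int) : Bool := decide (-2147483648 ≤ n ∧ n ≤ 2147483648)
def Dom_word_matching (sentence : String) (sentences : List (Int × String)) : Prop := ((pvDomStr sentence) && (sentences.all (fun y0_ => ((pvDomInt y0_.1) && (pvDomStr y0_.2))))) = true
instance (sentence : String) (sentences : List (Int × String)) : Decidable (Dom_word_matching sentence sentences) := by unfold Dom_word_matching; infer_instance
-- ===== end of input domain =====

-- B replaces A's sort-whole-list / slice / sort-again pipeline by a single pass that keeps a
-- bounded (≤ 20), stable, descending top list and builds the query word set only once (objective: faster, confirmed).

-- ===== PORT A =====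
def word_matching (sentence : String) (sentences : List (Int × String)) : List (List (String × Int)) :=
  PySem.List.sorted
    ((PySem.List.slice
        (PySem.List.sorted
          ((sentences.filter (fun p => decide (0 < PySem.Set.len (PySem.Set.inter (PySem.Set.ofList (PySem.Str.split₀ sentence)) (PySem.Set.ofList (PySem.Str.split₀ p.2)))))).map
            (fun p => (p.1, p.2, PySem.Set.len (PySem.Set.inter (PySem.Set.ofList (PySem.Str.split₀ sentence)) (PySem.Set.ofList (PySem.Str.split₀ p.2))))))
          (fun t => t.2.2) true)
        none (some 20)).foldl
      (fun acc t => acc ++ [[("index", t.1), ("score", t.2.2)]]) [])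
    (fun d => ((d.find? (fun kv => kv.1 == "score")).map (fun kv => kv.2)).getD (0 : Int)) true

-- ===== PORT B =====
-- _insert_desc: insert before the first entry with a strictly smaller score
def insertDesc (item : Int × Int) : List (Int × Int) → List (Int × Int)
  | [] => [item]
  | e :: rest => if e.2 < item.2 then item :: e :: rest else e :: insertDesc item rest

-- top[:20] on the nonnegative bound 20 is List.take 20 (exact)
def word_matching_alt (sentence : String) (sentences : List (Int × String)) : List (List (String × Int)) :=
  (sentences.foldl
    (fun top p =>
      let score := PySem.Set.len (PySem.Set.inter (PySem.Set.ofList (PySem.Str.split₀ sentence)) (PySem.Set.ofList (PySem.Str.split₀ p.2)))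
      if 0 < score then (insertDesc (p.1, score) top).take 20 else top)
    []).map (fun q => [("index", q.1), ("score", q.2)])

-- ===== PRECONDITION & SPEC =====
def Spec_word_matching (sentence : String) (sentences : List (Int × String)) (out : List (List (String × Int))) : Prop := out = word_matching_alt sentence sentences
instance (sentence : String) (sentences : List (Int × String)) (out : List (List (String × Int))) : Decidable (Spec_word_matching sentence sentences out) := by unfold Spec_word_matching; infer_instance

-- ===== CLAIM (what is proved, stated in full; the proofs are below) =====
def Claim_equal_word_matching : Prop := ∀ (sentence : String) (sentences : List (Int × String)), Dom_word_matching sentence sentences → Spec_word_matching sentence sentences (word_matching sentence sentences)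

-- ===== LEMMAS AND PROOFS =====

lemma insertDesc_eq_insertBy (item : Int × Int) (l : List (Int × Int)) :
    insertDesc item l = PySem.List.insertBy (fun a b => decide (b.2 < a.2)) item l := by
  induction l with
  | nil => simp [insertDesc, PySem.List.insertBy]
  | cons e rest ih => simp [insertDesc, PySem.List.insertBy, ih]

lemma take_cons_take {α : Type} (y : α) (t : List α) (n : Nat) :
    (y :: t.take n).take n = (y :: t).take n := by
  cases n with
  | zero => simp
  | succ m => simp [List.take_take]

lemma take_insertBy {α : Type} (b : α → α → Bool) (x : α) :
    ∀ (l : List α) (n : Nat), (PySem.List.insertBy b x (l.take n)).take n = (PySem.List.insertBy b x l).take n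
  | [], n => by simp
  | y :: t, 0 => by simp
  | y :: t, n + 1 => by
      simp only [List.take_succ_cons, PySem.List.insertBy]
      by_cases h : b x y
      · simp [h, take_cons_take]
      · simp [h, take_insertBy b x t n]

lemma foldl_take_insertBy {α β : Type} (b : β → β → Bool) (g : α → β) (n : Nat) (l : List α) :
    l.foldl (fun acc x => (PySem.List.insertBy b (g x) acc).take n) [] =
      (l.foldl (fun acc x => PySem.List.insertBy b (g x) acc) []).take n := by
  induction l using List.reverseRecOn with
  | nil => simp
  | append_singleton l x ih => simp [List.foldl_append, ih, take_insertBy]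

lemma insertBy_map {α β κ : Type} [LinearOrder κ] (key : β → κ) (f : α → β) (x : α) (l : List α) :
    PySem.List.insertBy (fun a b => decide (key b < key a)) (f x) (l.map f) =
      (PySem.List.insertBy (fun a b => decide (key (f b) < key (f a))) x l).map f := by
  induction l with
  | nil => simp [PySem.List.insertBy]
  | cons e rest ih =>
      simp only [List.map_cons, PySem.List.insertBy]
      by_cases h : key (f e) < key (f x)
      · simp [h]
      · simp [h, ih]

lemma sorted_rev_map {α β κ : Type} [LinearOrder κ] (key : β → κ) (f : α → β) (l : List α) :
    PySem.List.sorted (l.map f) key true = (PySem.List.sorted l (fun x => key (f x)) true).map f := by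
  rw [PySem.List.sorted_rev_eq_foldl_insertBy, PySem.List.sorted_rev_eq_foldl_insertBy, List.foldl_map]
  induction l using List.reverseRecOn with
  | nil => simp
  | append_singleton l x ih => simp [List.foldl_append, ih, insertBy_map]

-- x["score"]: first-match association-list lookup; the key is always present in the dicts built above
lemma dkey_pair (i s : Int) :
    ((([("index", i), ("score", s)] : List (String × Int)).find? (fun kv => kv.1 == "score")).map (fun kv => kv.2)).getD (0 : Int) = s := by
  simp [List.find?]

lemma foldl_insertBy_map {α β κ : Type} [LinearOrder κ] (key : β → κ) (g : α → β) (l : List α) :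
    l.foldl (fun acc x => PySem.List.insertBy (fun a b => decide (key b < key a)) (g x) acc) [] =
      PySem.List.sorted (l.map g) key true := by
  rw [PySem.List.sorted_rev_eq_foldl_insertBy, List.foldl_map]

lemma main_eq (sc : String → Int) (sentences : List (Int × String)) :
    PySem.List.sorted
      ((PySem.List.slice
          (PySem.List.sorted
            ((sentences.filter (fun p => decide (0 < sc p.2))).map (fun p => (p.1, p.2, sc p.2)))
            (fun t => t.2.2) true)
          none (some 20)).foldl (fun acc t => acc ++ [[("index", t.1), ("score", t.2.2)]]) [])
      (fun d => ((d.find? (fun kv => kv.1 == "score")).map (fun kv => kv.2)).getD (0 : Int)) true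
    =
    (sentences.foldl (fun top p => if 0 < sc p.2 then (insertDesc (p.1, sc p.2) top).take 20 else top) []).map
      (fun q => [("index", q.1), ("score", q.2)]) := by
  rw [PySem.List.foldl_ite_eq_foldl_filter (p := fun p : Int × String => 0 < sc p.2)
        (f := fun acc p => (insertDesc (p.1, sc p.2) acc).take 20)]
  simp only [insertDesc_eq_insertBy]
  rw [foldl_take_insertBy (fun a b : Int × Int => decide (b.2 < a.2)) (fun p : Int × String => (p.1, sc p.2)) 20]
  rw [foldl_insertBy_map (fun q : Int × Int => q.2) (fun p : Int × String => (p.1, sc p.2))]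
  rw [PySem.List.slice_to _ (by norm_num : (0:Int) ≤ 20)]
  rw [PySem.List.foldl_append_singleton_eq_map (fun t : Int × String × Int => [("index", t.1), ("score", t.2.2)])]
  rw [List.nil_append]
  rw [PySem.List.sorted_rev_eq_self_of_pairwise]
  · rw [sorted_rev_map (fun q : Int × Int => q.2) (fun p : Int × String => (p.1, sc p.2)),
        sorted_rev_map (fun t : Int × String × Int => t.2.2) (fun p : Int × String => (p.1, p.2, sc p.2))]
    rw [← List.map_take, ← List.map_take, List.map_map, List.map_map]
    rfl
  · refine List.pairwise_map.mpr (List.Pairwise.sublist (List.take_sublist _ _) ?_)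
    refine (PySem.List.sorted_pairwise_rev _ _).imp ?_
    intro a b h
    simpa [dkey_pair] using h

theorem word_matching_spec : Claim_equal_word_matching := by
  intro sentence sentences _
  unfold Spec_word_matching word_matching word_matching_alt
  exact (main_eq (fun s => PySem.Set.len (PySem.Set.inter (PySem.Set.ofList (PySem.Str.split₀ sentence)) (PySem.Set.ofList (PySem.Str.split₀ s)))) sentences)
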